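-- pv_equiv track=rewrite | github.com/19AByrne/work | averages/averages.py | Last5
-- ===== SOURCE A (Python) =====
-- def antimode(L):
--     NL=[]
--     for x in range(len(L)):
--         NL.append(0)
--     for x in range(len(L)):
--         xcount = 0
--         for y in L:
--             if y == L[x]:
--                 xcount+=1
--             else:
--                 pass
--         NL[x] = xcount
--
--     small = 0
--     for i in range(len(L)):
--         if NL[i] < NL[small]:
--             small = i
--
--     return L[small]
--
-- def Last5(L):
--     lengthvariable = len(L)
--     last5 = []
--     NL = L.copy()
--     for x in range(5):
--         m = antimode(NL)
--         last5.append(m)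
--         for i in range(NL.count(m)):
--             NL.remove(m)
--     return last5
-- ===== SOURCE B (Python) =====
-- def Last5(L):
--     distinct = []
--     for x in L:
--         if x not in distinct:
--             distinct.append(x)
--     ordered = sorted(distinct, key=L.count)
--     return [ordered[i] for i in range(5)]
-- ===== Notes on version B (the rewrite author's own statement) =====
-- stated objective: faster
-- what changed: Replaces the 5-round antimode selection (each round rebuilding a full count array over the shrinking list and deleting all copies of the chosen value) by one first-occurrence dedup plus a single stable sort of the distinct values by their count, then a slice of the first five.
import Mathlib
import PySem

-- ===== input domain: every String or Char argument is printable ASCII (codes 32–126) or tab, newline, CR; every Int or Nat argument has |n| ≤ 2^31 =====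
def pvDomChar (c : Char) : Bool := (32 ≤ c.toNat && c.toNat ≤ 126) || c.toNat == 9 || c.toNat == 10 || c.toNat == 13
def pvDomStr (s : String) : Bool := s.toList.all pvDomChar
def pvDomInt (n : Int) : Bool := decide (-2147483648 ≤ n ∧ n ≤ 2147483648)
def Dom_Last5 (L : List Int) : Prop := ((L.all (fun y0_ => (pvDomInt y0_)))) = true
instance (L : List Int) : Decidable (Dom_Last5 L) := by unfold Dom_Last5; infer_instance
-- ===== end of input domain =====

-- B replaces the repeated antimode/delete rounds by one dedup + one stable sort by count + a slice.
-- ===== PORT A =====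
-- helper of A: antimode — first value of M whose count in M is minimal
def antimode (M : List Int) : Int :=
  let NL0 := (PySem.List.pyRange 0 (PySem.List.len M) 1).foldl (fun nl _ => nl ++ [(0 : Int)]) []
  let NL := (PySem.List.pyRange 0 (PySem.List.len M) 1).foldl
      (fun nl x =>
        let xcount := M.foldl (fun c y => if y = PySem.List.pyGetD M x 0 then c + 1 else c) (0 : Int)
        PySem.List.pySetD nl x xcount) NL0
  let small := (PySem.List.pyRange 0 (PySem.List.len M) 1).foldl
      (fun s i => if PySem.List.pyGetD NL i 0 < PySem.List.pyGetD NL s 0 then i else s) (0 : Int)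
  PySem.List.pyGetD M small 0

-- A's `lengthvariable = len(L)` is dead code and is not reproduced
def Last5 (L : List Int) : List Int :=
  ((PySem.List.pyRange 0 5 1).foldl
    (fun (st : List Int × List Int) _ =>
      let m := antimode st.2
      let last5 := st.1 ++ [m]
      let NL := (PySem.List.pyRange 0 ((st.2.count m : Int)) 1).foldl
          (fun nl _ => (PySem.List.remove? nl m).getD nl) st.2
      (last5, NL))
    ([], L)).1

-- ===== PORT B =====
def Last5_alt (L : List Int) : List Int :=
  let distinct := L.foldl (fun acc x => if x ∈ acc then acc else acc ++ [x]) ([] : List Int)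
  let ordered := PySem.List.sorted distinct (fun v => (L.count v : Int))
  (PySem.List.pyRange 0 5 1).map (fun i => PySem.List.pyGetD ordered i 0)

-- ===== PRECONDITION & SPEC =====
-- Pre_ excludes exactly the lists with fewer than 5 distinct values, on which A raises IndexError
def Pre_Last5 (L : List Int) : Prop := 5 ≤ L.toFinset.card
instance (L : List Int) : Decidable (Pre_Last5 L) := by unfold Pre_Last5; infer_instance
def pvWitness_Last5 : List Int := [1, 2, 3, 4, 5]

def Spec_Last5 (L : List Int) (out : List Int) : Prop := out = Last5_alt L
instance (L : List Int) (out : List Int) : Decidable (Spec_Last5 L out) := by unfold Spec_Last5; infer_instance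

-- ===== CLAIM (what is proved, stated in full; the proofs are below) =====
def Claim_equal_Last5 : Prop := ∀ (L : List Int), Dom_Last5 L → Pre_Last5 L → Spec_Last5 L (Last5 L)

-- ===== LEMMAS AND PROOFS =====

-- key of a value: its count in L, as Python's int
def kf (L : List Int) (v : Int) : Int := (L.count v : Int)

-- one step of the running-minimum value scan
def gstep (k : Int → Int) (m v : Int) : Int := if k v < k m then v else m

-- first-occurrence dedup (what B's first loop builds)
def pydedup (L : List Int) : List Int :=
  L.foldl (fun acc x => if x ∈ acc then acc else acc ++ [x]) []

-- recursion form of the dedup loop, with an explicit seen-list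
def dAux : List Int → List Int → List Int
  | _, [] => []
  | seen, x :: t => if x ∈ seen then dAux seen t else x :: dAux (seen ++ [x]) t

-- spec3 k r M: r is the first element of M with minimal key
def spec3 (k : Int → Int) (r : Int) (M : List Int) : Prop :=
  r ∈ M ∧ (∀ v ∈ M, k r ≤ k v) ∧ (∀ p ∈ M.takeWhile (fun v => v ≠ r), k r < k p)

theorem foldl_dedup_eq_dAux (t : List Int) : ∀ seen,
    t.foldl (fun acc x => if x ∈ acc then acc else acc ++ [x]) seen = seen ++ dAux seen t := by
  induction t with
  | nil => intro seen; simp [dAux]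
  | cons x t ih =>
    intro seen
    simp only [List.foldl, dAux]
    by_cases h : x ∈ seen
    · simp [h, ih]
    · simp [h, ih (seen ++ [x])]

theorem mem_dAux (t : List Int) : ∀ seen x, x ∈ dAux seen t ↔ x ∈ t ∧ x ∉ seen := by
  induction t with
  | nil => intro seen x; simp [dAux]
  | cons y t ih =>
    intro seen x
    simp only [dAux]
    by_cases h : y ∈ seen
    · simp only [if_pos h, ih, List.mem_cons]
      constructor
      · rintro ⟨hx, hns⟩; exact ⟨Or.inr hx, hns⟩
      · rintro ⟨hx | hx, hns⟩
        · exact absurd (hx ▸ h) hns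
        · exact ⟨hx, hns⟩
    · simp only [if_neg h, List.mem_cons, ih (seen ++ [y])]
      constructor
      · rintro (rfl | ⟨hx, hns⟩)
        · exact ⟨Or.inl rfl, h⟩
        · simp only [List.mem_append, List.mem_singleton] at hns
          push Not at hns
          exact ⟨Or.inr hx, hns.1⟩
      · rintro ⟨rfl | hx, hns⟩
        · exact Or.inl rfl
        · by_cases hxy : x = y
          · exact Or.inl hxy
          · exact Or.inr ⟨hx, by simp [hns, hxy]⟩

theorem nodup_dAux (t : List Int) : ∀ seen, (dAux seen t).Nodup := by
  induction t with
  | nil => intro seen; simp [dAux]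
  | cons x t ih =>
    intro seen
    simp only [dAux]
    by_cases h : x ∈ seen
    · simp [h, ih]
    · simp only [if_neg h, List.nodup_cons]
      refine ⟨fun hx => ?_, ih _⟩
      rw [mem_dAux] at hx
      simp at hx

theorem mem_pydedup' (L : List Int) (x : Int) : x ∈ pydedup L ↔ x ∈ L := by
  unfold pydedup
  rw [foldl_dedup_eq_dAux, List.nil_append, mem_dAux]
  simp

theorem nodup_pydedup (L : List Int) : (pydedup L).Nodup := by
  unfold pydedup
  rw [foldl_dedup_eq_dAux, List.nil_append]
  exact nodup_dAux _ _

theorem length_pydedup (L : List Int) : (pydedup L).length = L.toFinset.card := by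
  have h1 : (pydedup L).toFinset = L.toFinset := by
    ext x; simp [List.mem_toFinset, mem_pydedup']
  rw [← h1, List.toFinset_card_of_nodup (nodup_pydedup L)]

theorem takeWhile_dAux (t : List Int) : ∀ seen p r, r ∉ seen →
    p ∈ (dAux seen t).takeWhile (fun v => v ≠ r) → p ∈ t.takeWhile (fun v => v ≠ r) := by
  induction t with
  | nil => intro seen p r _ h; simp [dAux] at h
  | cons x t ih =>
    intro seen p r hr h
    by_cases hxr : x = r
    · subst hxr
      rw [dAux, if_neg hr] at h
      simp at h ⊢
    · rw [List.takeWhile_cons, if_pos (by simp [hxr])]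
      rw [dAux] at h
      by_cases hx : x ∈ seen
      · rw [if_pos hx] at h
        exact List.mem_cons_of_mem _ (ih seen p r hr h)
      · rw [if_neg hx, List.takeWhile_cons, if_pos (by simp [hxr])] at h
        rcases List.mem_cons.1 h with rfl | h2
        · exact List.mem_cons_self
        · refine List.mem_cons_of_mem _ (ih (seen ++ [x]) p r ?_ h2)
          simp [hr]; rintro rfl; exact hxr rfl

theorem takeWhile_filter (q : Int → Bool) (r : Int) (L : List Int) (hq : q r = true) :
    (L.filter q).takeWhile (fun v => v ≠ r) = (L.takeWhile (fun v => v ≠ r)).filter q := by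
  induction L with
  | nil => simp
  | cons x t ih =>
    by_cases hxr : x = r
    · subst hxr
      rw [List.filter_cons_of_pos hq,
        List.takeWhile_cons_of_neg (p := fun v => decide (v ≠ x)) (by simp),
        List.takeWhile_cons_of_neg (p := fun v => decide (v ≠ x)) (by simp)]
      simp
    · by_cases hx : q x
      · rw [List.filter_cons_of_pos hx,
          List.takeWhile_cons_of_pos (p := fun v => decide (v ≠ r)) (by simp [hxr]),
          List.takeWhile_cons_of_pos (p := fun v => decide (v ≠ r)) (by simp [hxr]),
          List.filter_cons_of_pos hx, ih]
      · rw [List.filter_cons_of_neg (by simp [hx]),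
          List.takeWhile_cons_of_pos (p := fun v => decide (v ≠ r)) (by simp [hxr]),
          List.filter_cons_of_neg (by simp [hx]), ih]

theorem takeWhile_sublist {D E : List Int} (r p : Int) (hs : D.Sublist E) (hn : E.Nodup)
    (hr : r ∈ D) (hp : p ∈ D.takeWhile (fun v => v ≠ r)) : p ∈ E.takeWhile (fun v => v ≠ r) := by
  induction hs with
  | slnil => simp at hp
  | cons e hs ih =>
    rename_i D' E'
    have hn' : E'.Nodup := (List.nodup_cons.1 hn).2
    have her : e ≠ r := by
      rintro rfl
      exact (List.nodup_cons.1 hn).1 (hs.subset hr)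
    rw [List.takeWhile_cons, if_pos (by simp [her])]
    exact List.mem_cons_of_mem _ (ih hn' hr hp)
  | cons₂ x hs ih =>
    rename_i D' E'
    have hn' : E'.Nodup := (List.nodup_cons.1 hn).2
    by_cases hxr : x = r
    · subst hxr
      rw [List.takeWhile_cons] at hp
      simp at hp
    · rw [List.takeWhile_cons, if_pos (by simp [hxr])] at hp
      rw [List.takeWhile_cons, if_pos (by simp [hxr])]
      rcases List.mem_cons.1 hp with rfl | hp2
      · exact List.mem_cons_self
      · have hr' : r ∈ D' := by
          rcases List.mem_cons.1 hr with rfl | h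
          · exact absurd rfl hxr
          · exact h
        exact List.mem_cons_of_mem _ (ih hn' hr' hp2)

theorem ne_of_mem_takeWhile {p r : Int} {D : List Int}
    (h : p ∈ D.takeWhile (fun v => v ≠ r)) : p ≠ r := by
  have := List.mem_takeWhile_imp h
  simpa using this

theorem dropWhile_mem_cons {r : Int} {D : List Int} (h : r ∈ D) :
    D.dropWhile (fun v => v ≠ r) = r :: (D.dropWhile (fun v => v ≠ r)).tail := by
  induction D with
  | nil => simp at h
  | cons x t ih =>
    by_cases hxr : x = r
    · subst hxr; simp
    · rw [List.dropWhile_cons, if_pos (by simp [hxr])]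
      exact ih (by rcases List.mem_cons.1 h with rfl | h2; exact absurd rfl hxr; exact h2)

theorem takeWhile_append_cons (pre post : List Int) (r : Int) (h : ∀ p ∈ pre, p ≠ r) :
    (pre ++ r :: post).takeWhile (fun v => v ≠ r) = pre := by
  induction pre with
  | nil => simp
  | cons x t ih =>
    rw [List.cons_append, List.takeWhile_cons, if_pos (by simp [h x List.mem_cons_self])]
    rw [ih (fun p hp => h p (List.mem_cons_of_mem _ hp))]

theorem scan_spec (k : Int → Int) : ∀ (xs : List Int) (a : Int),
    (xs.foldl (gstep k) a = a ∧ ∀ v ∈ xs, k a ≤ k v) ∨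
    (∃ pre post, xs = pre ++ (xs.foldl (gstep k) a) :: post ∧
      k (xs.foldl (gstep k) a) < k a ∧
      (∀ p ∈ pre, k (xs.foldl (gstep k) a) < k p) ∧
      (∀ b ∈ post, k (xs.foldl (gstep k) a) ≤ k b)) := by
  intro xs
  induction xs with
  | nil => intro a; left; simp
  | cons x t ih =>
    intro a
    rw [List.foldl_cons]
    by_cases hx : k x < k a
    · have hstep : gstep k a x = x := by simp [gstep, hx]
      rw [hstep]
      rcases ih x with ⟨heq, hmin⟩ | ⟨pre, post, hsplit, hlt, hpre, hpost⟩
      · right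
        exact ⟨[], t, by simp [heq], by rw [heq]; exact hx, by simp, by rw [heq]; exact hmin⟩
      · right
        refine ⟨x :: pre, post, by simp only [List.cons_append]; rw [← hsplit], lt_trans hlt hx, ?_, hpost⟩
        intro p hp
        rcases List.mem_cons.1 hp with rfl | hp2
        · exact hlt
        · exact hpre p hp2
    · have hstep : gstep k a x = a := by simp [gstep, hx]
      rw [hstep]
      rcases ih a with ⟨heq, hmin⟩ | ⟨pre, post, hsplit, hlt, hpre, hpost⟩
      · left
        refine ⟨heq, ?_⟩
        intro v hv
        rcases List.mem_cons.1 hv with rfl | hv2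
        · omega
        · exact hmin v hv2
      · right
        refine ⟨x :: pre, post, by simp only [List.cons_append]; rw [← hsplit], hlt, ?_, hpost⟩
        intro p hp
        rcases List.mem_cons.1 hp with rfl | hp2
        · omega
        · exact hpre p hp2

theorem scan_spec3 (k : Int → Int) (M : List Int) (h : M ≠ []) :
    spec3 k (M.foldl (gstep k) (M.headD 0)) M := by
  obtain ⟨x, t, rfl⟩ := List.exists_cons_of_ne_nil h
  simp only [List.headD_cons]
  rcases scan_spec k (x :: t) x with ⟨heq, hmin⟩ | ⟨pre, post, hsplit, hlt, hpre, hpost⟩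
  · rw [heq]
    refine ⟨List.mem_cons_self, ?_, ?_⟩
    · intro v hv
      rcases List.mem_cons.1 hv with rfl | hv2
      · exact le_refl _
      · exact hmin v (by exact List.mem_cons_of_mem _ hv2)
    · intro p hp
      rw [List.takeWhile_cons_of_neg (p := fun v => decide (v ≠ x)) (by simp)] at hp
      simp at hp
  · set r := (x :: t).foldl (gstep k) x with hr
    refine ⟨by rw [hsplit]; simp, ?_, ?_⟩
    · intro v hv
      rw [hsplit, List.mem_append, List.mem_cons] at hv
      rcases hv with hv | rfl | hv
      · exact le_of_lt (hpre v hv)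
      · exact le_refl _
      · exact hpost v hv
    · intro p hp
      rw [hsplit, takeWhile_append_cons _ _ _ (fun p hp => by
        intro hpr; exact absurd (hpr ▸ hpre p hp) (lt_irrefl _))] at hp
      exact hpre p hp

theorem insertBy_front (bf : Int → Int → Bool) (x : Int) (ys : List Int)
    (h : ∀ y, ys.head? = some y → bf x y = true) :
    PySem.List.insertBy bf x ys = x :: ys := by
  cases ys with
  | nil => rfl
  | cons y t => simp [PySem.List.insertBy, h y rfl]

theorem sorted_append_singleton (D : List Int) (x : Int) (k : Int → Int) :
    PySem.List.sorted (D ++ [x]) k =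
      PySem.List.insertBy (fun a b => decide (k a < k b)) x (PySem.List.sorted D k) := by
  rw [PySem.List.sorted_eq_foldl_insertBy, PySem.List.sorted_eq_foldl_insertBy, List.foldl_append]
  simp

theorem sorted_decomp (k : Int → Int) (pre : List Int) (r : Int) : ∀ (post : List Int),
    (∀ p ∈ pre, k r < k p) → (∀ b ∈ post, k r ≤ k b) →
    PySem.List.sorted (pre ++ r :: post) k = r :: PySem.List.sorted (pre ++ post) k := by
  intro post
  induction post using List.reverseRecOn with
  | nil =>
    intro hpre _
    have : pre ++ [r] = pre ++ [r] := rfl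
    rw [show pre ++ r :: ([] : List Int) = pre ++ [r] by simp, sorted_append_singleton]
    rw [insertBy_front _ _ _ (fun y hy => ?_), List.append_nil]
    have hy' : y ∈ PySem.List.sorted pre k := List.mem_of_mem_head? hy
    rw [PySem.List.mem_sorted] at hy'
    simp [hpre y hy']
  | append_singleton q b ih =>
    intro hpre hpost
    have h1 : pre ++ r :: (q ++ [b]) = (pre ++ r :: q) ++ [b] := by simp
    rw [h1, sorted_append_singleton,
      ih hpre (fun c hc => hpost c (List.mem_append_left _ hc))]
    have hbr : (fun a b => decide (k a < k b)) b r = false := by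
      simp
      exact hpost b (by simp)
    rw [show PySem.List.insertBy (fun a b => decide (k a < k b)) b
        (r :: PySem.List.sorted (pre ++ q) k) =
        r :: PySem.List.insertBy (fun a b => decide (k a < k b)) b
          (PySem.List.sorted (pre ++ q) k) by
      simp [PySem.List.insertBy, hbr]]
    rw [← sorted_append_singleton]
    simp

theorem sorted_head_erase (k : Int → Int) (r : Int) (D : List Int) (h : spec3 k r D) :
    PySem.List.sorted D k = r :: PySem.List.sorted (D.erase r) k := by
  obtain ⟨hr, hmin, htw⟩ := h
  set tw := D.takeWhile (fun v => v ≠ r) with htwdef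
  set rest := (D.dropWhile (fun v => v ≠ r)).tail with hrest
  have hsplit : D = tw ++ r :: rest := by
    conv_lhs => rw [← List.takeWhile_append_dropWhile (p := fun v => decide (v ≠ r)) (l := D)]
    rw [dropWhile_mem_cons hr]
  have hntw : r ∉ tw := fun hmem => absurd rfl (ne_of_mem_takeWhile hmem)
  have herase : D.erase r = tw ++ rest := by
    rw [hsplit, List.erase_append_right _ hntw, List.erase_cons_head]
  rw [herase, hsplit]
  exact sorted_decomp k tw r rest htw
    (fun b hb => hmin b (by rw [hsplit]; exact List.mem_append_right _ (List.mem_cons_of_mem _ hb)))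


theorem foldl_const_iterate (g : List Int → List Int) (l : List Int) : ∀ init,
    l.foldl (fun s _ => g s) init = g^[l.length] init := by
  induction l with
  | nil => intro i; simp
  | cons x t ih => intro i; simp [List.foldl, ih, Function.iterate_succ_apply]

theorem length_pyRange0 (n : Nat) : (PySem.List.pyRange 0 (n : Int) 1).length = n := by
  rw [PySem.List.pyRange_zero_natCast]; simp

theorem remove?_getD (l : List Int) (m : Int) (h : m ∈ l) :
    (PySem.List.remove? l m).getD l = l.erase m := by
  rcases h' : l.idxOf? m with _ | i
  · rw [List.idxOf?_eq_none_iff] at h'; exact absurd h h'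
  · rw [PySem.List.remove?, h', List.erase_eq_eraseIdx, h']; rfl

theorem erase_filter_ne (l : List Int) (m : Int) :
    (l.erase m).filter (fun v => v ≠ m) = l.filter (fun v => v ≠ m) := by
  induction l with
  | nil => simp
  | cons x t ih =>
    by_cases hxm : x = m
    · subst hxm
      rw [List.erase_cons_head, List.filter_cons_of_neg (by simp)]
    · rw [List.erase_cons_tail (by simp [hxm]),
        List.filter_cons_of_pos (by simp [hxm]),
        List.filter_cons_of_pos (by simp [hxm]), ih]

theorem iterate_remove_eq_filter (m : Int) : ∀ (c : Nat) (NL : List Int), NL.count m = c →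
    (fun nl => (PySem.List.remove? nl m).getD nl)^[c] NL = NL.filter (fun v => v ≠ m) := by
  intro c
  induction c with
  | zero =>
    intro NL hc
    rw [Function.iterate_zero_apply, eq_comm, List.filter_eq_self]
    intro a ha
    simp only [decide_eq_true_eq]
    rintro rfl
    exact absurd (List.count_eq_zero.1 hc) (by simp [ha])
  | succ c ih =>
    intro NL hc
    have hm : m ∈ NL := List.count_pos_iff.1 (by omega)
    rw [Function.iterate_succ_apply, remove?_getD NL m hm,
      ih (NL.erase m) (by rw [List.count_erase_self, hc]; omega), erase_filter_ne]

theorem removeAll_eq_filter (NL : List Int) (m : Int) :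
    (PySem.List.pyRange 0 ((NL.count m : Int)) 1).foldl
        (fun nl _ => (PySem.List.remove? nl m).getD nl) NL = NL.filter (fun v => v ≠ m) := by
  rw [foldl_const_iterate, length_pyRange0]
  exact iterate_remove_eq_filter m (NL.count m) NL rfl

theorem countP_decide_eq (M : List Int) (w : Int) :
    M.countP (fun y => decide (y = w)) = M.count w := by
  rw [List.count]; apply List.countP_congr; intro a _; simp

theorem set_len_append (as : List Int) (bs : List Int) (v : Int) : ∀ k, as.length = k →
    (as ++ bs).set k v = as ++ bs.set 0 v := by
  induction as generalizing bs with
  | nil => rintro k rfl; simp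
  | cons a t ih =>
    rintro k rfl
    simp only [List.cons_append, List.length_cons, List.set_cons_succ]
    rw [ih bs t.length rfl]

theorem pySetD_natCast (l : List Int) (k : Nat) (v : Int) (h : k < l.length) :
    PySem.List.pySetD l (k : Int) v = l.set k v := by
  simp [PySem.List.pySetD, PySem.List.pySet?, PySem.List.pyIdx?, h]

theorem pyGetD_map_natCast (M : List Int) (f : Int → Int) (i : Nat) (h : i < M.length) :
    PySem.List.pyGetD (M.map f) (i : Int) 0 = f (M.getD i 0) := by
  simp [PySem.List.pyGetD_natCast, List.getD_eq_getElem?_getD, h]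

theorem take_add_one_getD (M : List Int) (k : Nat) (h : k < M.length) :
    M.take (k + 1) = M.take k ++ [M.getD k 0] := by
  rw [List.take_add_one, List.getElem?_eq_getElem h]
  simp [List.getD_eq_getElem?_getD, h]

theorem foldl_append_zero {α : Type} (l : List α) : ∀ acc : List Int,
    l.foldl (fun nl _ => nl ++ [(0 : Int)]) acc = acc ++ List.replicate l.length 0 := by
  induction l with
  | nil => intro acc; simp
  | cons x t ih => intro acc; simp [List.foldl, ih, List.replicate_succ]

theorem counts_eq (M : List Int) : ∀ k, k ≤ M.length →
    (List.range k).foldl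
        (fun nl (x : Nat) => PySem.List.pySetD nl (x : Int) ((M.count (M.getD x 0) : Int)))
        (List.replicate M.length 0)
      = (M.take k).map (fun v => (M.count v : Int)) ++ List.replicate (M.length - k) 0 := by
  intro k
  induction k with
  | zero => intro _; simp
  | succ k ih =>
    intro hk
    have hk' : k < M.length := by omega
    rw [List.range_succ, List.foldl_append, ih (by omega), List.foldl_cons, List.foldl_nil]
    have hlen : ((M.take k).map (fun v => (M.count v : Int))).length = k := by
      simp [List.length_take, Nat.min_eq_left (le_of_lt hk')]
    have hlen2 : (((M.take k).map (fun v => (M.count v : Int))) ++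
        List.replicate (M.length - k) (0 : Int)).length = M.length := by
      simp; omega
    rw [pySetD_natCast _ _ _ (by rw [hlen2]; exact hk')]
    rw [set_len_append _ _ _ k hlen]
    rw [show M.length - k = (M.length - (k+1)) + 1 by omega, List.replicate_succ, List.set_cons_zero]
    rw [take_add_one_getD M k hk']
    simp

theorem scan_inv (M : List Int) (hne : M ≠ []) : ∀ k, k ≤ M.length →
    ∃ j : Nat, (List.range k).foldl
        (fun (s : Int) (i : Nat) =>
          if PySem.List.pyGetD (M.map (fun v => (M.count v : Int))) (i : Int) 0 <
             PySem.List.pyGetD (M.map (fun v => (M.count v : Int))) s 0 then (i : Int) else s) 0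
        = (j : Int) ∧ j < M.length ∧
      M.getD j 0 = (M.take k).foldl (gstep (fun v => (M.count v : Int))) (M.headD 0) := by
  intro k
  induction k with
  | zero =>
    intro _
    refine ⟨0, by simp, by cases M; simp at hne; simp, by cases M; simp at hne; simp⟩
  | succ k ih =>
    intro hk
    have hk' : k < M.length := by omega
    obtain ⟨j, hj, hjlt, hjval⟩ := ih (by omega)
    rw [List.range_succ, List.foldl_append, List.foldl_cons, List.foldl_nil, hj]
    rw [take_add_one_getD M k hk', List.foldl_append, List.foldl_cons, List.foldl_nil, ← hjval]
    rw [pyGetD_map_natCast M _ k hk', pyGetD_map_natCast M _ j hjlt]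
    by_cases hcmp : (M.count (M.getD k 0) : Int) < (M.count (M.getD j 0) : Int)
    · refine ⟨k, ?_, hk', ?_⟩
      · rw [if_pos hcmp]
      · simp only [gstep]; rw [if_pos hcmp]
    · refine ⟨j, ?_, hjlt, ?_⟩
      · rw [if_neg hcmp]
      · simp only [gstep]; rw [if_neg hcmp]

theorem anti_eq_scan (M : List Int) (hne : M ≠ []) :
    antimode M = M.foldl (gstep (fun v => (M.count v : Int))) (M.headD 0) := by
  simp only [antimode, PySem.List.len_eq, PySem.List.pyRange_zero_natCast, List.foldl_map]
  have hfun : (fun (nl : List Int) (x : Nat) =>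
      PySem.List.pySetD nl (x : Int)
        (M.foldl (fun c y => if y = PySem.List.pyGetD M (x : Int) 0 then c + 1 else c) (0 : Int)))
      = (fun (nl : List Int) (x : Nat) =>
      PySem.List.pySetD nl (x : Int) ((M.count (M.getD x 0) : Int))) := by
    funext nl x
    rw [PySem.List.pyGetD_natCast]
    have hci := PySem.List.foldl_count_if (fun y => decide (y = M.getD x 0)) M 0
    simp only [decide_eq_true_eq] at hci
    rw [hci, countP_decide_eq]
    simp
  rw [foldl_append_zero]
  simp only [List.nil_append, List.length_range]
  rw [hfun, counts_eq M M.length le_rfl]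
  simp only [List.take_length, Nat.sub_self, List.replicate_zero, List.append_nil]
  obtain ⟨j, hj, hjlt, hjval⟩ := scan_inv M hne M.length le_rfl
  rw [hj, PySem.List.pyGetD_natCast, hjval, List.take_length]

theorem anti_spec3 (L M : List Int) (hne : M ≠ []) (hcnt : ∀ v ∈ M, (M.count v : Int) = kf L v) :
    spec3 (kf L) (antimode M) M := by
  have h1 := scan_spec3 (fun v => (M.count v : Int)) M hne
  rw [← anti_eq_scan M hne] at h1
  obtain ⟨h1a, h1b, h1c⟩ := h1
  refine ⟨h1a, ?_, ?_⟩
  · intro v hv; rw [← hcnt v hv, ← hcnt _ h1a]; exact h1b v hv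
  · intro p hp
    have hpM : p ∈ M := (List.takeWhile_sublist _).subset hp
    rw [← hcnt p hpM, ← hcnt _ h1a]; exact h1c p hp

theorem main_step (L D : List Int) (hsub : D.Sublist (pydedup L)) (hne : D ≠ []) :
    antimode (L.filter (fun v => v ∈ D)) ∈ D ∧
    PySem.List.sorted D (kf L) =
      antimode (L.filter (fun v => v ∈ D)) ::
        PySem.List.sorted (D.erase (antimode (L.filter (fun v => v ∈ D)))) (kf L) ∧
    (L.filter (fun v => v ∈ D)).filter
        (fun v => v ≠ antimode (L.filter (fun v => v ∈ D)))
      = L.filter (fun v => v ∈ D.erase (antimode (L.filter (fun v => v ∈ D)))) := by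
  have hmemD : ∀ v, v ∈ D → v ∈ L := fun v hv => (mem_pydedup' L v).1 (hsub.subset hv)
  have hmemNL : ∀ v, v ∈ L.filter (fun v => v ∈ D) ↔ v ∈ L ∧ v ∈ D := by
    intro v; simp [List.mem_filter]
  have hNLne : L.filter (fun v => v ∈ D) ≠ [] := by
    obtain ⟨d, hd⟩ := List.exists_mem_of_ne_nil D hne
    exact List.ne_nil_of_mem ((hmemNL d).2 ⟨hmemD d hd, hd⟩)
  have hcnt : ∀ v ∈ L.filter (fun v => v ∈ D),
      ((L.filter (fun v => v ∈ D)).count v : Int) = kf L v := by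
    intro v hv
    rw [List.count_filter (by simp [((hmemNL v).1 hv).2])]
    rfl
  have S_NL := anti_spec3 L _ hNLne hcnt
  have hrD : antimode (L.filter (fun v => v ∈ D)) ∈ D := ((hmemNL _).1 S_NL.1).2
  have hpyd : pydedup L = dAux [] L := by
    rw [pydedup, foldl_dedup_eq_dAux, List.nil_append]
  have S_D : spec3 (kf L) (antimode (L.filter (fun v => v ∈ D))) D := by
    refine ⟨hrD, ?_, ?_⟩
    · intro v hv
      exact S_NL.2.1 v ((hmemNL v).2 ⟨hmemD v hv, hv⟩)
    · intro p hp
      have hpD : p ∈ D := (List.takeWhile_sublist _).subset hp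
      have h1 := takeWhile_sublist _ p hsub (nodup_pydedup L) hrD hp
      rw [hpyd] at h1
      have h2 := takeWhile_dAux L [] p _ (by simp) h1
      have h3 : p ∈ (L.filter (fun v => v ∈ D)).takeWhile
          (fun v => v ≠ antimode (L.filter (fun v => v ∈ D))) := by
        rw [takeWhile_filter _ _ L (by simp [hrD])]
        exact List.mem_filter.2 ⟨h2, by simp [hpD]⟩
      exact S_NL.2.2 p h3
  have hnd : D.Nodup := hsub.nodup (nodup_pydedup L)
  refine ⟨hrD, sorted_head_erase _ _ _ S_D, ?_⟩
  rw [List.filter_filter]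
  apply List.filter_congr
  intro v hv
  simp [List.Nodup.mem_erase_iff hnd, and_comm]
  exact Bool.and_comm _ _


-- proof-side name for the body of A's outer loop
def stepA (st : List Int × List Int) : List Int × List Int :=
  let m := antimode st.2
  let last5 := st.1 ++ [m]
  let NL := (PySem.List.pyRange 0 ((st.2.count m : Int)) 1).foldl
      (fun nl _ => (PySem.List.remove? nl m).getD nl) st.2
  (last5, NL)

theorem Last5_eq_stepA (L : List Int) :
    Last5 L = ((PySem.List.pyRange 0 5 1).foldl (fun st _ => stepA st) ([], L)).1 := rfl

theorem stepA_filter (L D : List Int) (acc : List Int)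
    (hsub : D.Sublist (pydedup L)) (hne : D ≠ []) :
    stepA (acc, L.filter (fun v => v ∈ D)) =
      (acc ++ [antimode (L.filter (fun v => v ∈ D))],
       L.filter (fun v => v ∈ D.erase (antimode (L.filter (fun v => v ∈ D))))) := by
  obtain ⟨_, _, h3⟩ := main_step L D hsub hne
  simp only [stepA]
  rw [removeAll_eq_filter, h3]

-- ===== VERDICT (by name: the statement is the Claim_ definition above) =====
theorem Last5_spec : Claim_equal_Last5 := by
  unfold Claim_equal_Last5
  intro L _ hpre
  unfold Spec_Last5
  unfold Pre_Last5 at hpre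
  have hlen0 : 5 ≤ (pydedup L).length := by rw [length_pydedup]; exact hpre
  have hne0 : pydedup L ≠ [] := by
    intro h; rw [h] at hlen0; simp at hlen0
  have h0 : L.filter (fun v => v ∈ pydedup L) = L :=
    List.filter_eq_self.2 (fun a ha => by simp [mem_pydedup', ha])
  set D0 := pydedup L with hD0
  set m1 := antimode (L.filter (fun v => v ∈ D0)) with hm1
  set D1 := D0.erase m1 with hD1
  have hs1 := main_step L D0 (List.Sublist.refl _) hne0
  have hsub1 : D1.Sublist D0 := List.erase_sublist
  have hlen1 : D1.length = D0.length - 1 := List.length_erase_of_mem hs1.1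
  have hne1 : D1 ≠ [] := by
    intro h; rw [h] at hlen1; simp at hlen1; omega
  set m2 := antimode (L.filter (fun v => v ∈ D1)) with hm2
  set D2 := D1.erase m2 with hD2
  have hs2 := main_step L D1 hsub1 hne1
  have hsub2 : D2.Sublist D0 := List.Sublist.trans List.erase_sublist hsub1
  have hlen2 : D2.length = D1.length - 1 := List.length_erase_of_mem hs2.1
  have hne2 : D2 ≠ [] := by
    intro h; rw [h] at hlen2; simp at hlen2; omega
  set m3 := antimode (L.filter (fun v => v ∈ D2)) with hm3
  set D3 := D2.erase m3 with hD3
  have hs3 := main_step L D2 hsub2 hne2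
  have hsub3 : D3.Sublist D0 := List.Sublist.trans List.erase_sublist hsub2
  have hlen3 : D3.length = D2.length - 1 := List.length_erase_of_mem hs3.1
  have hne3 : D3 ≠ [] := by
    intro h; rw [h] at hlen3; simp at hlen3; omega
  set m4 := antimode (L.filter (fun v => v ∈ D3)) with hm4
  set D4 := D3.erase m4 with hD4
  have hs4 := main_step L D3 hsub3 hne3
  have hsub4 : D4.Sublist D0 := List.Sublist.trans List.erase_sublist hsub3
  have hlen4 : D4.length = D3.length - 1 := List.length_erase_of_mem hs4.1
  have hne4 : D4 ≠ [] := by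
    intro h; rw [h] at hlen4; simp at hlen4; omega
  set m5 := antimode (L.filter (fun v => v ∈ D4)) with hm5
  set D5 := D4.erase m5 with hD5
  have hs5 := main_step L D4 hsub4 hne4
  -- A side
  have hA : Last5 L = [m1, m2, m3, m4, m5] := by
    rw [Last5_eq_stepA,
      show PySem.List.pyRange 0 5 1 = [0, 1, 2, 3, 4] from rfl]
    simp only [List.foldl]
    rw [show (([] : List Int), L) = (([] : List Int), L.filter (fun v => v ∈ D0)) from by
      rw [h0]]
    rw [stepA_filter L D0 [] (List.Sublist.refl _) hne0, ← hm1, ← hD1,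
      stepA_filter L D1 ([] ++ [m1]) hsub1 hne1, ← hm2, ← hD2,
      stepA_filter L D2 (_ ++ [m2]) hsub2 hne2, ← hm3, ← hD3,
      stepA_filter L D3 (_ ++ [m3]) hsub3 hne3, ← hm4, ← hD4,
      stepA_filter L D4 (_ ++ [m4]) hsub4 hne4, ← hm5, ← hD5]
    simp
  -- B side
  have hB : Last5_alt L =
      (PySem.List.pyRange 0 5 1).map (fun i => PySem.List.pyGetD (PySem.List.sorted D0 (kf L)) i 0) :=
    rfl
  rw [hA, hB, hs1.2.1, hs2.2.1, hs3.2.1, hs4.2.1, hs5.2.1,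
    show PySem.List.pyRange 0 5 1 = [0, 1, 2, 3, 4] from rfl]
  simp [PySem.List.pyGetD_ofNat', hm1, hm2, hm3, hm4, hm5]
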